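-- pv_equiv track=rewrite | github.com/h1t3r/generateur_recurrent | dictionary.py | setup_dict
-- ===== SOURCE A (Python) =====
-- def setup_dict(size, startlength, length, tmp):
--     tmp2 = list(tmp)
--     length = int(length)
--     startlength = int(startlength)
--     for i in range(1, length+1):
--         tmp1 = list(tmp2)
--         tmp2 = []
--         for x in tmp1:
--             for y in tmp:
--                 tmp2.append(x+y)
--                 if size == "full":
--                     yield x+y
--                 elif size == "length":
--                     if i == length:
--                         yield x+y
--                 elif size == "section":
--                     if i >= startlength-1:
--                         yield x+y
-- ===== SOURCE B (Python) =====
-- def setup_dict(size, startlength, length, tmp):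
--     # Rank-decoding re-implementation: each level n is generated independently by
--     # decoding k in range(m**n) as base-m digits, instead of growing a reused
--     # per-level accumulator list from the previous level.
--     length = int(length)
--     startlength = int(startlength)
--     m = len(tmp)
--     for i in range(1, length + 1):
--         if size == "full" or (size == "length" and i == length) \
--            or (size == "section" and i >= startlength - 1):
--             n = i + 1
--             for k in range(m ** n):
--                 parts = []
--                 for _ in range(n):
--                     parts.append(tmp[k % m])
--                     k //= m
--                 yield ''.join(reversed(parts))
-- ===== Notes on version B (the rewrite author's own statement) =====
-- stated objective: alternative
-- what changed: Replaces A's incrementally reused per-level accumulator (tmp2 rebuilt from the previous level's list) with independent rank decoding: each emitted level n is generated directly by decoding k in range(len(tmp)**n) as base-m digits, and levels whose filter cannot yield are skipped entirely.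
import Mathlib
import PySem

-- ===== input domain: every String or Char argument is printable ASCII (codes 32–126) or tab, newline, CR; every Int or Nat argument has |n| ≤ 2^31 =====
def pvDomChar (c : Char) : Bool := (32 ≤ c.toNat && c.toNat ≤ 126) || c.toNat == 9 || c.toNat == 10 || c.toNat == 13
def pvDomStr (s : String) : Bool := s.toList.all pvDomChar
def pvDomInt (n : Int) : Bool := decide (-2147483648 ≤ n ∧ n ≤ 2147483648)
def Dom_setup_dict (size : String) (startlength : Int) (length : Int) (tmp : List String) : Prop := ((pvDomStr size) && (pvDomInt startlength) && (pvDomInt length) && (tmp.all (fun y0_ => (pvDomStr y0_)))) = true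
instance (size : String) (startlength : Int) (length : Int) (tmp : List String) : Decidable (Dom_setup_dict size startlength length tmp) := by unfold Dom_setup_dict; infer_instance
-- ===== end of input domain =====

-- B replaces A's reused per-level accumulator with independent base-m rank decoding per level (alternative decomposition, same results).
-- Both functions are Python generators; the value compared is the full list of yielded strings.


-- ===== PORT A =====
-- int(length)/int(startlength) are identities on Int and are omitted.
def setup_dict (size : String) (startlength : Int) (length : Int) (tmp : List String) : List String :=
  (PySem.List.pyRange 1 (length + 1) 1).foldl
    (fun (st : List String × List String) (i : Int) =>
      -- tmp1 = list(tmp2); tmp2 = []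
      st.1.foldl
        (fun (st2 : List String × List String) (x : String) =>
          tmp.foldl
            (fun (st3 : List String × List String) (y : String) =>
              (st3.1 ++ [x ++ y],
               if size == "full" then st3.2 ++ [x ++ y]
               else if size == "length" then
                 (if i == length then st3.2 ++ [x ++ y] else st3.2)
               else if size == "section" then
                 (if decide (startlength - 1 ≤ i) then st3.2 ++ [x ++ y] else st3.2)
               else st3.2))
            st2)
        (([] : List String), st.2))
    (tmp, ([] : List String))
  |>.2

-- ===== PORT B =====
-- parts list built least-significant digit first (Source B's inner loop); tmp[k % m] is
-- always in range in executed code (0 < m there), ported exactly via pyGet? with getD "".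
def pvPartsB (tmp : List String) (m : Nat) : Nat → Nat → List String
  | 0, _ => []
  | n + 1, k => ((PySem.List.pyGet? tmp (Int.ofNat (k % m))).getD "") :: pvPartsB tmp m n (k / m)

def setup_dict_alt (size : String) (startlength : Int) (length : Int) (tmp : List String) : List String :=
  let m := tmp.length
  (PySem.List.pyRange 1 (length + 1) 1).foldl
    (fun (out : List String) (i : Int) =>
      if size == "full" || (size == "length" && i == length)
         || (size == "section" && decide (startlength - 1 ≤ i)) then
        out ++ (List.range (m ^ (i.toNat + 1))).map
          (fun k => String.join ((pvPartsB tmp m (i.toNat + 1) k).reverse))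
      else out)
    []

-- ===== PRECONDITION & SPEC =====
def Spec_setup_dict (size : String) (startlength : Int) (length : Int) (tmp : List String) (out : List String) : Prop := out = setup_dict_alt size startlength length tmp
instance (size : String) (startlength : Int) (length : Int) (tmp : List String) (out : List String) : Decidable (Spec_setup_dict size startlength length tmp out) := by unfold Spec_setup_dict; infer_instance

-- ===== CLAIM (what is proved, stated in full; the proofs are below) =====
def Claim_equal_setup_dict : Prop := ∀ (size : String) (startlength : Int) (length : Int) (tmp : List String), Dom_setup_dict size startlength length tmp → Spec_setup_dict size startlength length tmp (setup_dict size startlength length tmp)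

-- ===== LEMMAS AND PROOFS =====

-- the yield condition of level i, as one boolean
def pvCond (size : String) (startlength : Int) (length : Int) (i : Int) : Bool :=
  size == "full" || (size == "length" && i == length)
    || (size == "section" && decide (startlength - 1 ≤ i))

-- one Cartesian-product extension step, and the per-level product lists
def pvExt (tmp xs : List String) : List String :=
  xs.flatMap (fun x => tmp.map (fun y => x ++ y))

def pvP (tmp : List String) : Nat → List String
  | 0 => tmp
  | j + 1 => pvExt tmp (pvP tmp j)

def pvO (size : String) (startlength : Int) (length : Int) (tmp : List String) : Nat → List String
  | 0 => []
  | j + 1 => pvO size startlength length tmp j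
      ++ (if pvCond size startlength length ((j : Int) + 1) then pvP tmp (j + 1) else [])

theorem pvFoldlCongr {α β : Type} (f g : α → β → α) (l : List β)
    (h : ∀ a b, b ∈ l → f a b = g a b) : ∀ init, l.foldl f init = l.foldl g init := by
  induction l with
  | nil => intro init; rfl
  | cons x xs ih =>
    intro init
    rw [List.foldl_cons, List.foldl_cons, h init x (by simp)]
    exact ih (fun a b hb => h a b (by simp [hb])) _

theorem pvNestedIf_eq (size : String) (startlength : Int) (length : Int) (i : Int)
    (acc : List String) (s : String) :
    (if size == "full" then acc ++ [s]
     else if size == "length" then (if i == length then acc ++ [s] else acc)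
     else if size == "section" then (if decide (startlength - 1 ≤ i) then acc ++ [s] else acc)
     else acc)
    = if pvCond size startlength length i then acc ++ [s] else acc := by
  unfold pvCond
  by_cases h1 : size = "full" <;> by_cases h2 : size = "length" <;>
    by_cases h3 : size = "section" <;> simp_all

theorem pvInnerFold (c : Bool) (x : String) (ys : List String) :
    ∀ t o : List String,
      ys.foldl (fun st3 y =>
          (st3.1 ++ [x ++ y], if c then st3.2 ++ [x ++ y] else st3.2)) (t, o)
      = (t ++ ys.map (fun y => x ++ y), o ++ if c then ys.map (fun y => x ++ y) else []) := by
  induction ys with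
  | nil => intro t o; cases c <;> simp
  | cons y ys ih =>
    intro t o
    rw [List.foldl_cons, ih]
    cases c <;> simp

theorem pvIteApp (c : Bool) (a b : List String) :
    (if c then a else []) ++ (if c then b else []) = if c then a ++ b else [] := by
  cases c <;> simp

theorem pvMidFold (size : String) (startlength : Int) (length : Int)
    (tmp : List String) (i : Int) (xs : List String) :
    ∀ t o : List String,
      xs.foldl (fun st2 x =>
          tmp.foldl (fun st3 y =>
              (st3.1 ++ [x ++ y],
               if size == "full" then st3.2 ++ [x ++ y]
               else if size == "length" then (if i == length then st3.2 ++ [x ++ y] else st3.2)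
               else if size == "section" then
                 (if decide (startlength - 1 ≤ i) then st3.2 ++ [x ++ y] else st3.2)
               else st3.2)) st2) (t, o)
      = (t ++ pvExt tmp xs,
         o ++ if pvCond size startlength length i then pvExt tmp xs else []) := by
  induction xs with
  | nil =>
    intro t o
    simp only [List.foldl_nil, pvExt, List.flatMap_nil]
    cases h : pvCond size startlength length i <;> simp
  | cons x xs ih =>
    intro t o
    rw [List.foldl_cons]
    have hbody : tmp.foldl (fun st3 y =>
        ((st3 : List String × List String).1 ++ [x ++ y],
         if size == "full" then st3.2 ++ [x ++ y]
         else if size == "length" then (if i == length then st3.2 ++ [x ++ y] else st3.2)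
         else if size == "section" then
           (if decide (startlength - 1 ≤ i) then st3.2 ++ [x ++ y] else st3.2)
         else st3.2)) (t, o)
        = (t ++ tmp.map (fun y => x ++ y),
           o ++ if pvCond size startlength length i then tmp.map (fun y => x ++ y) else []) := by
      rw [← pvInnerFold (pvCond size startlength length i) x tmp t o]
      exact pvFoldlCongr _ _ tmp (fun st3 y _ => by
        rw [pvNestedIf_eq size startlength length i st3.2 (x ++ y)]) (t, o)
    rw [hbody, ih]
    simp only [pvExt, List.flatMap_cons, List.append_assoc, pvIteApp]

theorem pvAFold (size : String) (startlength : Int) (length : Int) (tmp : List String) :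
    ∀ j : Nat,
      (PySem.List.pyRange 1 ((j : Int) + 1) 1).foldl
        (fun (st : List String × List String) (i : Int) =>
          st.1.foldl
            (fun st2 x =>
              tmp.foldl (fun st3 y =>
                  (st3.1 ++ [x ++ y],
                   if size == "full" then st3.2 ++ [x ++ y]
                   else if size == "length" then (if i == length then st3.2 ++ [x ++ y] else st3.2)
                   else if size == "section" then
                     (if decide (startlength - 1 ≤ i) then st3.2 ++ [x ++ y] else st3.2)
                   else st3.2)) st2)
            (([] : List String), st.2))
        (tmp, ([] : List String))
      = (pvP tmp j, pvO size startlength length tmp j) := by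
  intro j
  induction j with
  | zero => rw [PySem.List.pyRange_one_eq_nil (by omega)]; rfl
  | succ j ih =>
    have hcast : ((j + 1 : Nat) : Int) + 1 = ((j : Int) + 1) + 1 := by push_cast; ring
    rw [hcast, PySem.List.pyRange_one_succ_right (by omega), List.foldl_append, ih,
      List.foldl_cons, List.foldl_nil, pvMidFold]
    simp [pvP, pvO]

-- B-side: decoding lemmas
theorem pvJoin_append_singleton (l : List String) (s : String) :
    String.join (l ++ [s]) = String.join l ++ s := by
  simp [String.join, List.foldl_append]

theorem pvRangeMul (b : Nat) : ∀ a : Nat,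
    List.range (a * b) = (List.range a).flatMap (fun j => (List.range b).map (fun r => j * b + r)) := by
  intro a
  induction a with
  | zero => simp
  | succ a ih =>
    rw [Nat.succ_mul, List.range_add, List.range_succ, List.flatMap_append, ← ih]
    simp

theorem pvExt_nil (xs : List String) : pvExt [] xs = [] := by
  simp [pvExt]

theorem pvP_nil : ∀ n : Nat, pvP ([] : List String) n = [] := by
  intro n; cases n with
  | zero => rfl
  | succ n => simp [pvP, pvExt_nil]

theorem pvDecodeBase (tmp : List String) :
    (List.range tmp.length).map
      (fun k => ((PySem.List.pyGet? tmp (Int.ofNat (k % tmp.length))).getD "")) = tmp := by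
  apply List.ext_getElem
  · simp
  · intro i h1 h2
    simp only [List.getElem_map, List.getElem_range]
    have hi : i < tmp.length := by simpa using h2
    rw [Nat.mod_eq_of_lt hi]
    simp [PySem.List.pyGet?_natCast, List.getElem?_eq_getElem hi]

theorem pvMapBase (tmp : List String) (s : String) :
    (List.range tmp.length).map
      (fun r => s ++ ((PySem.List.pyGet? tmp (Int.ofNat r)).getD "")) = tmp.map (fun y => s ++ y) := by
  apply List.ext_getElem
  · simp
  · intro i h1 h2
    have hi : i < tmp.length := by simpa using h2
    simp [List.getElem_map, List.getElem_range, PySem.List.pyGet?_natCast,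
      List.getElem?_eq_getElem hi]

theorem pvDecode (tmp : List String) :
    ∀ n : Nat,
      (List.range (tmp.length ^ (n + 1))).map
        (fun k => String.join ((pvPartsB tmp tmp.length (n + 1) k).reverse))
      = pvP tmp n := by
  intro n
  induction n with
  | zero =>
    rw [pow_one]
    have : ∀ k, String.join ((pvPartsB tmp tmp.length 1 k).reverse)
        = (PySem.List.pyGet? tmp (Int.ofNat (k % tmp.length))).getD "" := by
      intro k
      simp [pvPartsB, String.join]
    simp only [this]
    exact pvDecodeBase tmp
  | succ n ih =>
    rcases Nat.eq_zero_or_pos tmp.length with hm | hm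
    · have htmp : tmp = [] := List.eq_nil_of_length_eq_zero hm
      subst htmp
      simp [pvP_nil]
    · have hpow : tmp.length ^ (n + 1 + 1) = tmp.length ^ (n + 1) * tmp.length := by ring
      rw [hpow, pvRangeMul, List.map_flatMap]
      have hstep : ∀ j ∈ List.range (tmp.length ^ (n + 1)),
          (List.map (fun k => String.join ((pvPartsB tmp tmp.length (n + 1 + 1) k).reverse))
            ((List.range tmp.length).map (fun r => j * tmp.length + r)))
          = tmp.map (fun y =>
              String.join ((pvPartsB tmp tmp.length (n + 1) j).reverse) ++ y) := by
        intro j _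
        rw [List.map_map]
        have : ∀ r ∈ List.range tmp.length,
            ((fun k => String.join ((pvPartsB tmp tmp.length (n + 1 + 1) k).reverse)) ∘
              (fun r => j * tmp.length + r)) r
            = String.join ((pvPartsB tmp tmp.length (n + 1) j).reverse) ++
                ((PySem.List.pyGet? tmp (Int.ofNat r)).getD "") := by
          intro r hr
          have hrlt : r < tmp.length := by simpa using hr
          have hmod : (j * tmp.length + r) % tmp.length = r := by
            rw [Nat.mul_comm j tmp.length, Nat.mul_add_mod, Nat.mod_eq_of_lt hrlt]
          have hdiv : (j * tmp.length + r) / tmp.length = j := by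
            rw [Nat.mul_comm j tmp.length, Nat.mul_add_div hm, Nat.div_eq_of_lt hrlt, Nat.add_zero]
          simp only [Function.comp_apply, pvPartsB, hmod, hdiv, List.reverse_cons,
            pvJoin_append_singleton]
        rw [List.map_congr_left this, pvMapBase]
      rw [List.flatMap_congr hstep]
      conv_rhs => rw [pvP, ← ih]
      rw [pvExt, List.flatMap_map]

theorem pvBFold (size : String) (startlength : Int) (length : Int) (tmp : List String) :
    ∀ j : Nat,
      (PySem.List.pyRange 1 ((j : Int) + 1) 1).foldl
        (fun (out : List String) (i : Int) =>
          if size == "full" || (size == "length" && i == length)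
             || (size == "section" && decide (startlength - 1 ≤ i)) then
            out ++ (List.range (tmp.length ^ (i.toNat + 1))).map
              (fun k => String.join ((pvPartsB tmp tmp.length (i.toNat + 1) k).reverse))
          else out)
        []
      = pvO size startlength length tmp j := by
  intro j
  induction j with
  | zero => rw [PySem.List.pyRange_one_eq_nil (by omega)]; rfl
  | succ j ih =>
    have hcast : ((j + 1 : Nat) : Int) + 1 = ((j : Int) + 1) + 1 := by push_cast; ring
    rw [hcast, PySem.List.pyRange_one_succ_right (by omega), List.foldl_append, ih,
      List.foldl_cons, List.foldl_nil]
    have htoNat : ((j : Int) + 1).toNat = j + 1 := by omega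
    rw [htoNat, pvDecode]
    show (if pvCond size startlength length ((j : Int) + 1) then
        pvO size startlength length tmp j ++ pvP tmp (j + 1)
      else pvO size startlength length tmp j) = _
    cases h : pvCond size startlength length ((j : Int) + 1) <;> simp [pvO, h]

theorem pvLenNorm (length : Int) :
    PySem.List.pyRange 1 (length + 1) 1 = PySem.List.pyRange 1 ((length.toNat : Int) + 1) 1 := by
  by_cases h : 0 ≤ length
  · rw [Int.toNat_of_nonneg h]
  · rw [PySem.List.pyRange_one_eq_nil (by omega), PySem.List.pyRange_one_eq_nil (by omega)]

-- ===== VERDICT (by name: the statement is the Claim_ definition above) =====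
theorem setup_dict_spec : Claim_equal_setup_dict := by
  intro size startlength length tmp _
  unfold Spec_setup_dict setup_dict setup_dict_alt
  rw [pvLenNorm, pvAFold size startlength length tmp length.toNat,
    pvBFold size startlength length tmp length.toNat]
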